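-- pv_equiv track=rewrite | github.com/hwitzthum/hwitzthum-skills-marketplace | skills/documentation-generator-pro/scripts/generate_docs.py | extract_translatable_strings
-- ===== SOURCE A (Python) =====
-- from typing import List
--
-- def extract_translatable_strings(md_content: str) -> List[str]:
--     """Extract strings that need translation from markdown"""
--     # This is a simplified version
--     # In practice, you'd want to:
--     # - Skip code blocks
--     # - Handle inline code differently
--     # - Preserve markdown formatting
--     # - Extract only prose content
--
--     lines = md_content.split("\n")
--     translatable = []
--     in_code_block = False
--
--     for line in lines:
--         # Toggle code block state
--         if line.strip().startswith("```"):
--             in_code_block = not in_code_block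
--             continue
--
--         # Skip code blocks
--         if in_code_block:
--             continue
--
--         # Skip empty lines
--         if not line.strip():
--             continue
--
--         # Skip pure markdown syntax lines
--         if line.strip().startswith("#") or line.strip().startswith("-"):
--             translatable.append(line)
--         elif line.strip():
--             translatable.append(line)
--
--     return translatable
-- ===== SOURCE B (Python) =====
-- def extract_translatable_strings(md_content):
--     """Extract strings that need translation from markdown"""
--     # Phase 1: cut the lines into segments at every fence line (fence lines dropped).
--     segments = []
--     current = []
--     for line in md_content.split("\n"):
--         if line.strip().startswith("```"):
--             segments.append(current)
--             current = []
--         else: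
--             current.append(line)
--     segments.append(current)
--     # Phase 2: segments alternate outside/inside code; keep non-blank lines of even segments.
--     return [ln for seg in segments[::2] for ln in seg if ln.strip()]
-- ===== Notes on version B (the rewrite author's own statement) =====
-- stated objective: alternative
-- what changed: Replaces the single loop with a running in_code_block boolean by two phases: first split the lines into segments at fence lines, then keep the non-blank lines of the even-indexed (outside-code) segments.
import Mathlib
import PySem

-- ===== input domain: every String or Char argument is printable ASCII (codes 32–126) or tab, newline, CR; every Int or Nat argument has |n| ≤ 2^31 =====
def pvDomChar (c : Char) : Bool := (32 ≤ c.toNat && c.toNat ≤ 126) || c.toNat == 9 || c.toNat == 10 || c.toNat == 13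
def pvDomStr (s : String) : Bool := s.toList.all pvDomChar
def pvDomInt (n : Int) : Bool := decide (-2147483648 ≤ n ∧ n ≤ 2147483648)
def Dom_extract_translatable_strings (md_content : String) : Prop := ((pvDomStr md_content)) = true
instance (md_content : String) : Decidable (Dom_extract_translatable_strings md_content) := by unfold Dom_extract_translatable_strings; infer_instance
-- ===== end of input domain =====

-- B: two phases (split lines into segments at fence lines, then keep non-blank lines of even
-- segments) instead of A's single loop with a running in_code_block boolean; same cost (alternative).


-- shared predicates (both Pythons write them inline): line.strip().startswith("```") / line.strip() non-empty
-- md_content.split("\n") (exact: Chars.splitOn is Python's sep-form split)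
def pvLines (md : String) : List String := (PySem.Chars.splitOn md.toList ['\n']).map (fun cs => String.ofList cs)

def pvFence (l : String) : Bool := PySem.Str.startswith (PySem.Str.strip l) "```"
def pvKeep (l : String) : Bool := !(PySem.Str.strip l == "")

-- ===== PORT A =====
-- loop body of A, on state (translatable, in_code_block)
def pvStepA (st : List String × Bool) (line : String) : List String × Bool :=
  if pvFence line then (st.1, !st.2)
  else if st.2 then st
  else if PySem.Str.strip line == "" then st
  else if PySem.Str.startswith (PySem.Str.strip line) "#" || PySem.Str.startswith (PySem.Str.strip line) "-" then
    (st.1 ++ [line], st.2)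
  else if pvKeep line then (st.1 ++ [line], st.2)
  else st

def extract_translatable_strings (md_content : String) : List String :=
  ((pvLines md_content).foldl pvStepA ([], false)).1

-- ===== PORT B =====
-- phase 1 loop body of B, on state (segments, current)
def pvStepB (st : List (List String) × List String) (line : String) : List (List String) × List String :=
  if pvFence line then (st.1 ++ [st.2], [])
  else (st.1, st.2 ++ [line])

-- segments[::2]
def pvEvens : List (List String) → List (List String)
  | [] => []
  | [s] => [s]
  | s :: _ :: r => s :: pvEvens r

def extract_translatable_strings_alt (md_content : String) : List String :=
  let p := (pvLines md_content).foldl pvStepB ([], [])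
  let segments := p.1 ++ [p.2]
  (pvEvens segments).flatMap (fun seg => seg.filter pvKeep)

-- ===== PRECONDITION & SPEC =====
def Spec_extract_translatable_strings (md_content : String) (out : List String) : Prop := out = extract_translatable_strings_alt md_content
instance (md_content : String) (out : List String) : Decidable (Spec_extract_translatable_strings md_content out) := by unfold Spec_extract_translatable_strings; infer_instance

-- ===== CLAIM (what is proved, stated in full; the proofs are below) =====
def Claim_equal_extract_translatable_strings : Prop := ∀ (md_content : String), Dom_extract_translatable_strings md_content → Spec_extract_translatable_strings md_content (extract_translatable_strings md_content)

-- ===== LEMMAS AND PROOFS =====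

-- A's loop, accumulator peeled off
def pvG : Bool → List String → List String
  | _, [] => []
  | b, l :: ls =>
    if pvFence l then pvG (!b) ls
    else if b then pvG b ls
    else if pvKeep l then l :: pvG false ls
    else pvG false ls

theorem foldA_eq (ls : List String) : ∀ (acc : List String) (b : Bool),
    (ls.foldl pvStepA (acc, b)).1 = acc ++ pvG b ls := by
  induction ls with
  | nil => intro acc b; simp [pvG]
  | cons l ls ih =>
    intro acc b
    by_cases hf : pvFence l
    · simp [pvStepA, pvG, hf, ih]
    · by_cases hb : b
      · simp [pvStepA, pvG, hf, hb, ih]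
      · by_cases hk : pvKeep l
        · have he : (PySem.Str.strip l == "") = false := by
            simpa [pvKeep] using hk
          by_cases hh : (PySem.Str.startswith (PySem.Str.strip l) "#" || PySem.Str.startswith (PySem.Str.strip l) "-") = true
          · simp [pvStepA, pvG, hf, hb, hk, he, ih]
          · simp [pvStepA, pvG, hf, hb, hk, he, ih]
        · have he : (PySem.Str.strip l == "") = true := by
            simpa [pvKeep] using hk
          simp [pvStepA, pvG, hf, hb, hk, he, ih]

-- recursive form of B's phase 1
def pvSplit : List String → List (List String)
  | [] => [[]]
  | l :: ls =>
    if pvFence l then [] :: pvSplit ls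
    else
      match pvSplit ls with
      | s :: r => (l :: s) :: r
      | [] => [[l]]

theorem pvSplit_ne_nil (ls : List String) : pvSplit ls ≠ [] := by
  cases ls with
  | nil => simp [pvSplit]
  | cons l ls =>
    unfold pvSplit
    split
    · simp
    · split <;> simp

-- prepend cur onto the head segment
def pvHC (cur : List String) : List (List String) → List (List String)
  | s :: r => (cur ++ s) :: r
  | [] => [cur]

theorem pvHC_nil (x : List (List String)) (hx : x ≠ []) : pvHC [] x = x := by
  cases x with
  | nil => exact absurd rfl hx
  | cons s r => simp [pvHC]

theorem foldB_eq (ls : List String) : ∀ (segs : List (List String)) (cur : List String),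
    (ls.foldl pvStepB (segs, cur)).1 ++ [(ls.foldl pvStepB (segs, cur)).2]
      = segs ++ pvHC cur (pvSplit ls) := by
  induction ls with
  | nil => intro segs cur; simp [pvSplit, pvHC]
  | cons l ls ih =>
    intro segs cur
    by_cases hf : pvFence l
    · have h0 := ih (segs ++ [cur]) []
      rw [pvHC_nil _ (pvSplit_ne_nil ls)] at h0
      simp only [List.foldl_cons, pvStepB, hf, if_pos]
      rw [h0]
      simp [pvSplit, hf, pvHC]
    · have h0 := ih segs (cur ++ [l])
      simp only [List.foldl_cons, pvStepB, hf, if_neg, Bool.false_eq_true, not_false_iff]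
      rw [h0]
      obtain ⟨s, r, hs⟩ : ∃ s r, pvSplit ls = s :: r := by
        cases h : pvSplit ls with
        | nil => exact absurd h (pvSplit_ne_nil ls)
        | cons s r => exact ⟨s, r, rfl⟩
      simp [pvSplit, hf, hs, pvHC]

theorem pvEvens_cons (x : List String) (t : List (List String)) :
    pvEvens (x :: t) = x :: pvEvens t.tail := by
  cases t <;> simp [pvEvens]

def pvFF (xs : List (List String)) : List String := xs.flatMap (fun seg => seg.filter pvKeep)

theorem G_eq (ls : List String) :
    pvG false ls = pvFF (pvEvens (pvSplit ls)) ∧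
    pvG true ls = pvFF (pvEvens (pvSplit ls).tail) := by
  induction ls with
  | nil => simp [pvG, pvSplit, pvEvens, pvFF]
  | cons l ls ih =>
    obtain ⟨h0, h1⟩ := ih
    obtain ⟨s, r, hs⟩ : ∃ s r, pvSplit ls = s :: r := by
      cases h : pvSplit ls with
      | nil => exact absurd h (pvSplit_ne_nil ls)
      | cons s r => exact ⟨s, r, rfl⟩
    by_cases hf : pvFence l
    · constructor
      · simp only [pvG, hf, if_pos, Bool.not_false]
        rw [h1, pvSplit]
        simp only [hf, if_pos]
        rw [pvEvens_cons]
        simp [pvFF, hs]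
      · simp only [pvG, hf, if_pos, Bool.not_true]
        rw [h0, pvSplit]
        simp [hf]
    · have hsplit : pvSplit (l :: ls) = (l :: s) :: r := by
        simp [pvSplit, hf, hs]
      constructor
      · rw [hsplit, pvEvens_cons]
        have h0' : pvG false ls = pvFF (s :: pvEvens r.tail) := by
          rw [h0, hs, pvEvens_cons]
        by_cases hk : pvKeep l
        · simp only [pvG, hf, if_neg, Bool.false_eq_true, not_false_iff, if_pos, hk]
          rw [h0']
          simp [pvFF, hk]
        · simp only [pvG, hf, Bool.false_eq_true, not_false_iff, if_neg, hk]
          rw [h0']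
          simp [pvFF, hk]
      · simp only [pvG, hf, Bool.false_eq_true, not_false_iff, if_neg, if_pos]
        rw [h1, hs, hsplit]
        simp

-- ===== VERDICT (by name: the statement is the Claim_ definition above) =====
theorem extract_translatable_strings_spec : Claim_equal_extract_translatable_strings := by
  intro md _
  unfold Spec_extract_translatable_strings extract_translatable_strings extract_translatable_strings_alt
  show (List.foldl pvStepA ([], false) (pvLines md)).1
      = (pvEvens (((pvLines md).foldl pvStepB ([], [])).1 ++ [((pvLines md).foldl pvStepB ([], [])).2])).flatMap
          (fun seg => seg.filter pvKeep)
  rw [foldA_eq, foldB_eq, pvHC_nil _ (pvSplit_ne_nil _)]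
  simpa [pvFF] using (G_eq (pvLines md)).1
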